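-- pv_equiv track=rewrite | github.com/yulin1709/PETRA-3.0 | classifier_backup.py | pick_category
-- ===== SOURCE A (Python) =====
-- from typing import Dict, List, Tuple
--
-- PRIORITY = [
--     "run corrective", "Push to SAP", "SAP Posting Failures", "Duplicate Invoice/Deal Number",
--     "PLSB Bucket Amendment", "Matching Issue",
--     "Not Update Data", "Missing Data", "Wrong Price", "Wrong Quantity",
--     "Discrepancies - Amount", "Discrepancies - exchange rate", "Discrepancies - Date",
--     "Discrepancies - Tax", "Discrepancies - Doc", "Discrepancies - Account",
--     "Discrepancies - Bank Account Issue", "Discrepancies - Customer Code",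
--     "Discrepancies - Company Code", "Discrepancies - Legal Entity",
--     "Discrepancies - Broker broker", "Discrepancies - Strategy", "Discrepancies - Address",
--     "Discrepancies - vessel", "Discrepancies - Freight", "Discrepancies - Bunker",
--     "Discrepancies - Counterparty", "Discrepancies - Details",
--     "System Error / Functional Issue", "Report Issue",
--     "Question Help Support", "Access Issue",
--     "Others",
-- ]
--
-- def pick_category(score_map: Dict[str, int]) -> str:
--     if not score_map: return "Others"
--     max_s = max(score_map.values())
--     if max_s <= 0: return "Others"
--     cands = [c for c, s in score_map.items() if s == max_s]
--     for c in PRIORITY: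
--         if c in cands:
--             return c
--     return cands[0]
-- ===== SOURCE B (Python) =====
-- PRIORITY = [
--     "run corrective", "Push to SAP", "SAP Posting Failures", "Duplicate Invoice/Deal Number",
--     "PLSB Bucket Amendment", "Matching Issue",
--     "Not Update Data", "Missing Data", "Wrong Price", "Wrong Quantity",
--     "Discrepancies - Amount", "Discrepancies - exchange rate", "Discrepancies - Date",
--     "Discrepancies - Tax", "Discrepancies - Doc", "Discrepancies - Account",
--     "Discrepancies - Bank Account Issue", "Discrepancies - Customer Code",
--     "Discrepancies - Company Code", "Discrepancies - Legal Entity",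
--     "Discrepancies - Broker broker", "Discrepancies - Strategy", "Discrepancies - Address",
--     "Discrepancies - vessel", "Discrepancies - Freight", "Discrepancies - Bunker",
--     "Discrepancies - Counterparty", "Discrepancies - Details",
--     "System Error / Functional Issue", "Report Issue",
--     "Question Help Support", "Access Issue",
--     "Others",
-- ]
--
-- _RANK = {c: i for i, c in enumerate(PRIORITY)}
--
-- def pick_category(score_map):
--     # single pass: track the best (category, score, rank); update only on a strictly
--     # better (score, rank) key so the earliest entry wins ties.
--     best = None
--     for c, s in score_map.items():
--         r = _RANK.get(c, len(PRIORITY))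
--         if best is None or s > best[1] or (s == best[1] and r < best[2]):
--             best = (c, s, r)
--     if best is None or best[1] <= 0:
--         return "Others"
--     return best[0]
-- ===== Notes on version B (the rewrite author's own statement) =====
-- stated objective: alternative
-- what changed: Replaces the separate max pass, filter pass and PRIORITY scan with a single fold over the items that tracks the best (category, score, rank) under the composite key (score, rank) with strict-update keep-first tie-breaking, using a precomputed rank table.
import Mathlib
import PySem

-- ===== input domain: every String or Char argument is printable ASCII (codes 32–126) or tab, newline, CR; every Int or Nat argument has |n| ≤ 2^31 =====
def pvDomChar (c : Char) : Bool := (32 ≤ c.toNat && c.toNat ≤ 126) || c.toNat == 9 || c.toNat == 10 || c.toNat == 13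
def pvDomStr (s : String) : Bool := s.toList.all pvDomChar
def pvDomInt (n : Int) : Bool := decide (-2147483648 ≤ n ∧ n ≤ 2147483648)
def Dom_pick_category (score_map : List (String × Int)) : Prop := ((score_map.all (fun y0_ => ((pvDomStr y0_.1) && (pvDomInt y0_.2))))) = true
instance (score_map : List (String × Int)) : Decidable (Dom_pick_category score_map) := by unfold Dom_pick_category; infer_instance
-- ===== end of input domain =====

-- B replaces A's max/filter/PRIORITY-scan with one keep-first argmax fold over the items (alternative decomposition, same results).


-- ===== PORT A =====
def PRIORITY : List String := [
  "run corrective", "Push to SAP", "SAP Posting Failures", "Duplicate Invoice/Deal Number",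
  "PLSB Bucket Amendment", "Matching Issue",
  "Not Update Data", "Missing Data", "Wrong Price", "Wrong Quantity",
  "Discrepancies - Amount", "Discrepancies - exchange rate", "Discrepancies - Date",
  "Discrepancies - Tax", "Discrepancies - Doc", "Discrepancies - Account",
  "Discrepancies - Bank Account Issue", "Discrepancies - Customer Code",
  "Discrepancies - Company Code", "Discrepancies - Legal Entity",
  "Discrepancies - Broker broker", "Discrepancies - Strategy", "Discrepancies - Address",
  "Discrepancies - vessel", "Discrepancies - Freight", "Discrepancies - Bunker",
  "Discrepancies - Counterparty", "Discrepancies - Details",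
  "System Error / Functional Issue", "Report Issue",
  "Question Help Support", "Access Issue",
  "Others"]

def pick_category (score_map : List (String × Int)) : String :=
  if score_map = [] then "Others"
  else
    -- max(score_map.values()) ; the guard makes the list nonempty, getD 0 is unreachable
    let max_s : Int := (PySem.List.max? (score_map.map Prod.snd) (fun v => v)).getD 0
    if max_s ≤ 0 then "Others"
    else
      let cands : List String := (score_map.filter (fun p => p.2 == max_s)).map Prod.fst
      match PRIORITY.find? (fun c => cands.contains c) with
      | some c => c
      | none => cands.headD ""   -- cands[0]; cands is nonempty here

-- ===== PORT B =====
-- _RANK.get(c, len(PRIORITY)): first index of c in PRIORITY, or its length if absent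
def rankOf (c : String) : Nat := PRIORITY.idxOf c

-- the loop body of B's single pass
def stepB (best : Option (String × Int × Nat)) (p : String × Int) : Option (String × Int × Nat) :=
  let r := rankOf p.1
  match best with
  | none => some (p.1, p.2, r)
  | some (bc, bs, br) =>
    if p.2 > bs ∨ (p.2 = bs ∧ r < br) then some (p.1, p.2, r) else some (bc, bs, br)

def pick_category_alt (score_map : List (String × Int)) : String :=
  match score_map.foldl stepB none with
  | none => "Others"
  | some (bc, bs, _) => if bs ≤ 0 then "Others" else bc

-- ===== PRECONDITION & SPEC =====
def Spec_pick_category (score_map : List (String × Int)) (out : String) : Prop := out = pick_category_alt score_map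
instance (score_map : List (String × Int)) (out : String) : Decidable (Spec_pick_category score_map out) := by unfold Spec_pick_category; infer_instance

-- ===== CLAIM (what is proved, stated in full; the proofs are below) =====
def Claim_equal_pick_category : Prop := ∀ (score_map : List (String × Int)), Dom_pick_category score_map → Spec_pick_category score_map (pick_category score_map)

-- ===== LEMMAS AND PROOFS =====

-- general list facts used to read off A's PRIORITY scan
theorem idxOf_getElem_le (l : List String) (j : Nat) (h : j < l.length) : l.idxOf (l[j]'h) ≤ j := by
  induction l generalizing j with
  | nil => simp at h
  | cons a t ih =>
    cases j with
    | zero => simp [List.idxOf, List.findIdx_cons]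
    | succ k =>
      have hk : k < t.length := by simpa using h
      simp only [List.getElem_cons_succ, List.idxOf, List.findIdx_cons] at *
      cases hb : (a == (t[k]'hk)) with
      | true => simp
      | false => simp only [cond_false]; have := ih k hk; omega

theorem find?_first (l : List String) (p : String → Bool) (i : Nat) (h : i < l.length) (hp : p (l[i]'h) = true)
    (hmin : ∀ j, (hj : j < i) → p (l[j]'(by omega)) = false) : l.find? p = some (l[i]'h) := by
  induction l generalizing i with
  | nil => simp at h
  | cons a t ih =>
    cases i with
    | zero => simp_all
    | succ k =>
      have h0 : p a = false := by simpa using hmin 0 (by omega)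
      rw [List.find?_cons, h0]
      have hk : k < t.length := by simpa using h
      exact ih k hk (by simpa using hp) (fun j hj => by simpa using hmin (j+1) (by omega))

-- the "first best element" that B's fold keeps, computed tail-first
def firstBest : List (String × Int) → Option (String × Int)
  | [] => none
  | p :: t =>
    some ((firstBest t).elim p
      (fun q => if q.2 > p.2 ∨ (q.2 = p.2 ∧ rankOf q.1 < rankOf p.1) then q else p))

theorem firstBest_eq_none {m : List (String × Int)} (h : firstBest m = none) : m = [] := by
  cases m with
  | nil => rfl
  | cons p t => simp [firstBest] at h

-- how a seed best combines with the best of the remaining items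
def combine (b : String × Int) : Option (String × Int) → Option (String × Int × Nat)
  | none => some (b.1, b.2, rankOf b.1)
  | some q =>
    if q.2 > b.2 ∨ (q.2 = b.2 ∧ rankOf q.1 < rankOf b.1)
    then some (q.1, q.2, rankOf q.1) else some (b.1, b.2, rankOf b.1)

-- B's fold from a seeded best equals the seed combined with firstBest of the rest
theorem foldB_some (m : List (String × Int)) (b : String × Int) :
    m.foldl stepB (some (b.1, b.2, rankOf b.1)) = combine b (firstBest m) := by
  induction m generalizing b with
  | nil => simp [firstBest, combine]
  | cons p t ih =>
    simp only [List.foldl_cons, stepB]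
    by_cases hpb : p.2 > b.2 ∨ (p.2 = b.2 ∧ rankOf p.1 < rankOf b.1)
    · rw [if_pos hpb, ih p]
      cases hf : firstBest t with
      | none => simp [firstBest, hf, combine, hpb]
      | some q =>
        simp only [firstBest, hf, Option.elim, combine]
        split_ifs <;> first | rfl | (exfalso; omega)
    · rw [if_neg hpb, ih b]
      cases hf : firstBest t with
      | none => simp [firstBest, hf, combine, hpb]
      | some q =>
        simp only [firstBest, hf, Option.elim, combine]
        split_ifs <;> first | rfl | (exfalso; omega)

-- B's whole fold computes firstBest (with the rank attached)
theorem foldB_none (m : List (String × Int)) :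
    m.foldl stepB none = (firstBest m).map (fun q => (q.1, q.2, rankOf q.1)) := by
  cases m with
  | nil => simp [firstBest]
  | cons p t =>
    simp only [List.foldl_cons, stepB]
    rw [foldB_some t p]
    cases hf : firstBest t with
    | none => simp [firstBest, hf, combine]
    | some q =>
      simp only [firstBest, hf, Option.elim, combine]
      split_ifs <;> simp

-- the positional characterisation of firstBest: everything before it is strictly worse,
-- everything after it is no better under the (score, rank) key
theorem firstBest_spec (m : List (String × Int)) (c : String) (s : Int)
    (h : firstBest m = some (c, s)) :
    ∃ l₁ l₂, m = l₁ ++ (c, s) :: l₂ ∧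
      (∀ q ∈ l₁, q.2 < s ∨ (q.2 = s ∧ rankOf c < rankOf q.1)) ∧
      (∀ q ∈ l₂, q.2 < s ∨ (q.2 = s ∧ rankOf c ≤ rankOf q.1)) := by
  induction m generalizing c s with
  | nil => simp [firstBest] at h
  | cons p t ih =>
    cases hf : firstBest t with
    | none =>
      have ht : t = [] := firstBest_eq_none hf
      simp only [firstBest, hf, Option.elim, Option.some.injEq] at h
      have hp : p = (c, s) := h
      subst hp; subst ht
      exact ⟨[], [], rfl, by simp, by simp⟩
    | some q =>
      simp only [firstBest, hf, Option.elim, Option.some.injEq] at h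
      by_cases h1 : q.2 > p.2 ∨ (q.2 = p.2 ∧ rankOf q.1 < rankOf p.1)
      · rw [if_pos h1] at h
        have hq : q = (c, s) := h
        subst hq
        obtain ⟨l₁, l₂, heq, hl₁, hl₂⟩ := ih c s hf
        refine ⟨p :: l₁, l₂, by simp [heq], ?_, hl₂⟩
        intro x hx
        rcases List.mem_cons.mp hx with rfl | hx'
        · dsimp only at h1; omega
        · exact hl₁ x hx'
      · rw [if_neg h1] at h
        have hp : p = (c, s) := h
        obtain ⟨l₁, l₂, heq, hl₁, hl₂⟩ := ih q.1 q.2 (by simpa using hf)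
        refine ⟨[], t, by simp [hp], by simp, ?_⟩
        intro x hx
        rw [heq] at hx
        have hps : p.2 = s ∧ rankOf p.1 = rankOf c := by
          constructor
          · rw [hp]
          · rw [hp]
        rcases hps with ⟨hs2, hr2⟩
        rcases List.mem_append.mp hx with hx1 | hx2
        · have := hl₁ x hx1
          simp only at *
          omega
        · rcases List.mem_cons.mp hx2 with rfl | hx3
          · simp only at *
            omega
          · have := hl₂ x hx3
            simp only at *
            omega

-- A characterisation of A's max_s from the firstBest decomposition
theorem max?_values (m : List (String × Int)) (s : Int)
    (hmem : s ∈ m.map Prod.snd) (hle : ∀ y ∈ m.map Prod.snd, y ≤ s) :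
    PySem.List.max? (m.map Prod.snd) (fun v => v) = some s := by
  cases hv : PySem.List.max? (m.map Prod.snd) (fun v => v) with
  | none =>
    rw [PySem.List.max?_eq_none_iff] at hv
    rw [hv] at hmem; simp at hmem
  | some v =>
    have h1 : v ∈ m.map Prod.snd := PySem.List.max?_mem hv
    have h2 := PySem.List.max?_isMax hv s hmem
    have h3 := hle v h1
    simp only [Option.some.injEq]
    omega

-- ===== VERDICT (by name: the statement is the Claim_ definition above) =====
theorem pick_category_spec : Claim_equal_pick_category := by
  intro m _
  unfold Spec_pick_category
  cases hfb : firstBest m with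
  | none =>
    have hm : m = [] := firstBest_eq_none hfb
    subst hm
    simp [pick_category, pick_category_alt]
  | some cs =>
    obtain ⟨c, s⟩ := cs
    have hm : m ≠ [] := by
      intro h; subst h; simp [firstBest] at hfb
    obtain ⟨l₁, l₂, heq, hl₁, hl₂⟩ := firstBest_spec m c s hfb
    have hB : pick_category_alt m = (if s ≤ 0 then "Others" else c) := by
      unfold pick_category_alt
      rw [foldB_none, hfb]
      by_cases hs : s ≤ 0 <;> simp [hs]
    have hsmem : s ∈ m.map Prod.snd := by rw [heq]; simp
    have hle : ∀ y ∈ m.map Prod.snd, y ≤ s := by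
      intro y hy
      rcases List.mem_map.mp hy with ⟨x, hx, rfl⟩
      rw [heq] at hx
      rcases List.mem_append.mp hx with hx1 | hx2
      · have := hl₁ x hx1; omega
      · rcases List.mem_cons.mp hx2 with rfl | hx3
        · simp
        · have := hl₂ x hx3; omega
    have hmax := max?_values m s hsmem hle
    rw [hB]
    unfold pick_category
    rw [if_neg hm, hmax]
    simp only [Option.getD_some]
    by_cases hs : s ≤ 0
    · rw [if_pos hs, if_pos hs]
    · rw [if_neg hs, if_neg hs]
      -- the candidate list of A, decomposed along heq
      have hcands : (m.filter (fun p => p.2 == s)).map Prod.fst =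
          ((l₁.filter (fun p => p.2 == s)).map Prod.fst) ++
            c :: ((l₂.filter (fun p => p.2 == s)).map Prod.fst) := by
        rw [heq]
        simp [List.filter_append]
      have hmemc : ∀ x ∈ (m.filter (fun p => p.2 == s)).map Prod.fst, rankOf c ≤ rankOf x := by
        intro x hx
        rcases List.mem_map.mp hx with ⟨q, hq, rfl⟩
        have hq1 := List.mem_of_mem_filter hq
        have hq2 : q.2 = s := by simpa using List.of_mem_filter hq
        rw [heq] at hq1
        rcases List.mem_append.mp hq1 with h1 | h2
        · have := hl₁ q h1; omega
        · rcases List.mem_cons.mp h2 with rfl | h3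
          · simp
          · have := hl₂ q h3; omega
      have hcmem : c ∈ (m.filter (fun p => p.2 == s)).map Prod.fst := by
        rw [hcands]; simp
      by_cases hrk : rankOf c < PRIORITY.length
      · -- A's PRIORITY scan stops exactly at index rankOf c, which names c
        have hgetc : PRIORITY[rankOf c]'hrk = c := List.getElem_idxOf hrk
        have hfind : PRIORITY.find? (fun x => ((m.filter (fun p => p.2 == s)).map Prod.fst).contains x)
            = some c := by
          rw [find?_first PRIORITY _ (rankOf c) hrk (by simp [hgetc, hcmem])
            (fun j hj => ?_)]
          · rw [hgetc]
          · by_contra hcon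
            simp only [Bool.not_eq_false, List.contains_iff_mem] at hcon
            have hjlen : j < PRIORITY.length := by omega
            have h1 : rankOf c ≤ PRIORITY.idxOf (PRIORITY[j]'hjlen) := hmemc _ hcon
            have h2 : PRIORITY.idxOf (PRIORITY[j]'hjlen) ≤ j := idxOf_getElem_le PRIORITY j hjlen
            unfold rankOf at h1 hj
            omega
        rw [hfind]
      · -- c is not in PRIORITY: the scan finds nothing and A returns cands[0] = c
        have hrkc : PRIORITY.length ≤ rankOf c := by omega
        have hfind : PRIORITY.find? (fun x => ((m.filter (fun p => p.2 == s)).map Prod.fst).contains x)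
            = none := by
          rw [List.find?_eq_none]
          intro x hx
          simp only [List.contains_iff_mem]
          intro hcon
          have h1 := hmemc _ hcon
          have h2 : rankOf x < PRIORITY.length := by
            unfold rankOf
            exact List.idxOf_lt_length_of_mem hx
          omega
        rw [hfind]
        have hnil : l₁.filter (fun p => p.2 == s) = [] := by
          rw [List.filter_eq_nil_iff]
          intro q hq
          simp only [beq_iff_eq]
          intro hqs
          have := hl₁ q hq
          have h2 : rankOf q.1 ≤ PRIORITY.length := List.idxOf_le_length
          omega
        rw [hcands, hnil]
        simp
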